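-- pv_equiv track=rewrite | github.com/DedInc/opentele2 | src/td/storage.py | ToFilePart
-- ===== SOURCE A (Python) =====
-- def ToFilePart(val: int):
--     result = str()
--     for i in range(0x10):
--         v = val & 0xF
--         if v < 0x0A:
--             result += chr(ord("0") + v)
--         else:
--             result += chr(ord("A") + (v - 0x0A))
--         val >>= 4
--     return result
-- ===== SOURCE B (Python) =====
-- def ToFilePart(val: int):
--     return format(val & 0xFFFFFFFFFFFFFFFF, '016X')[::-1]
-- ===== Notes on version B (the rewrite author's own statement) =====
-- stated objective: idiomatic
-- what changed: Replaces the sixteen-iteration LSB-first nibble loop (mask, branch on digit, shift) with a single closed-form expression: mask to the low sixty-four bits once, render with a zero-padded uppercase hex format call, and reverse the string.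
import Mathlib
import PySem

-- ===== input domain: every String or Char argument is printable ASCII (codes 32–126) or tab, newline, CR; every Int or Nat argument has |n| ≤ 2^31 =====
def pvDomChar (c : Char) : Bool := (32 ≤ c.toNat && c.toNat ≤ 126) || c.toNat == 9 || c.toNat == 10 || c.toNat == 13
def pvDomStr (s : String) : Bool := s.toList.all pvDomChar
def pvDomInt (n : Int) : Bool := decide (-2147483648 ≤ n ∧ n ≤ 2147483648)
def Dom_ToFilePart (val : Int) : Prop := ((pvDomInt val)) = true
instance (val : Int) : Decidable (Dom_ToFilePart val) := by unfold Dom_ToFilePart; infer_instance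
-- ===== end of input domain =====

-- B replaces A's sixteen-step LSB-first nibble loop by a closed form: mask to the low
-- sixty-four bits once, format as fixed-width big-endian uppercase hex, reverse (idiomatic; same cost).


-- ===== PORT A =====
-- literal transliteration: result = ""; for i in range(0x10): v = val & 0xF;
-- append '0'+v or 'A'+(v-10); val >>= 4.  ('&' is PySem.Int.band, '>>' is Lean's '>>>',
-- both Python-exact on negatives.)
def ToFilePart (val : Int) : String :=
  (((PySem.List.pyRange 0 16 1).foldl
      (fun (st : String × Int) _ =>
        let v := PySem.Int.band st.2 15
        let r := if v < 10
          then st.1 ++ String.ofList [Char.ofNat (48 + v).toNat]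
          else st.1 ++ String.ofList [Char.ofNat (65 + (v - 10)).toNat]
        (r, st.2 >>> (4:Nat)))
      ("", val))).1

-- ===== PORT B =====
-- Source B: return format(val & 0xFFFFFFFFFFFFFFFF, '016X')[::-1]
-- hexDigitB/hexBE port the library call format(m, '016X'): fixed-width (16) big-endian
-- uppercase hex digits of a nonnegative integer; then reverse = [::-1].
def hexDigitB (n : Nat) : Char := if n < 10 then Char.ofNat (48 + n) else Char.ofNat (55 + n)

def hexBE : Nat → Nat → List Char
  | 0, _ => []
  | k + 1, m => hexBE k (m / 16) ++ [hexDigitB (m % 16)]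

def ToFilePart_alt (val : Int) : String :=
  String.ofList ((hexBE 16 ((PySem.Int.band val 18446744073709551615).toNat)).reverse)

-- ===== PRECONDITION & SPEC =====
def Spec_ToFilePart (val : Int) (out : String) : Prop := out = ToFilePart_alt val
instance (val : Int) (out : String) : Decidable (Spec_ToFilePart val out) := by unfold Spec_ToFilePart; infer_instance

-- ===== CLAIM (what is proved, stated in full; the proofs are below) =====
def Claim_equal_ToFilePart : Prop := ∀ (val : Int), Dom_ToFilePart val → Spec_ToFilePart val (ToFilePart val)

-- ===== LEMMAS AND PROOFS =====

-- Python's a & (2^m - 1) is a mod 2^m (floor mod), for every integer a.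
theorem band_two_pow_sub_one (m : Nat) (a : Int) :
    PySem.Int.band a (2 ^ m - 1) = (a % 2 ^ m) := by
  have hb : (0 : Int) ≤ 2 ^ m - 1 := by
    have : (1 : Int) ≤ 2 ^ m := one_le_pow₀ (by norm_num)
    omega
  by_cases ha : 0 ≤ a
  · simp only [PySem.Int.band, if_pos ha, if_pos hb]
    have h1 : ((2:Int) ^ m - 1).toNat = 2 ^ m - 1 := by
      have hc : ((2:Int) ^ m) = ((2 ^ m : Nat) : Int) := by push_cast; rfl
      have hk : 1 ≤ 2 ^ m := Nat.one_le_two_pow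
      rw [hc]; omega
    rw [h1, Nat.and_two_pow_sub_one_eq_mod, Int.natCast_emod]
    push_cast [Int.toNat_of_nonneg ha]
    rfl
  · simp only [PySem.Int.band, if_neg ha, if_pos hb]
    have h1 : ((2:Int) ^ m - 1).toNat = 2 ^ m - 1 := by
      have hc : ((2:Int) ^ m) = ((2 ^ m : Nat) : Int) := by push_cast; rfl
      have hk : 1 ≤ 2 ^ m := Nat.one_le_two_pow
      rw [hc]; omega
    rw [h1, Nat.and_comm, Nat.and_two_pow_sub_one_eq_mod]
    set n : Nat := (-a - 1).toNat with hn
    have han : a = -(n : Int) - 1 := by omega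
    have hP : (0:Int) < 2 ^ m := by positivity
    have hmod : ((n : Int) % 2 ^ m) = ((n % 2 ^ m : Nat) : Int) := by
      push_cast
      rfl
    have hlt : ((n % 2 ^ m : Nat) : Int) < 2 ^ m := by
      rw [← hmod]; exact Int.emod_lt_of_pos _ hP
    have hge : (0:Int) ≤ ((n % 2 ^ m : Nat) : Int) := by positivity
    -- a = -(n+1); a mod 2^m = 2^m - 1 - (n mod 2^m)
    have key : (a % 2 ^ m) = 2 ^ m - 1 - ((n % 2 ^ m : Nat) : Int) := by
      have hdecomp : a = (2 ^ m - 1 - ((n : Int) % 2 ^ m)) + (-( (n : Int) / 2 ^ m) - 1) * 2 ^ m := by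
        have h5 := Int.ediv_add_emod (n : Int) (2 ^ m)
        have h6 : (-( (n : Int) / 2 ^ m) - 1) * 2 ^ m = -(2 ^ m * ((n : Int) / 2 ^ m)) - 2 ^ m := by
          ring
        omega
      rw [hdecomp, Int.add_mul_emod_self_right, hmod]
      exact Int.emod_eq_of_lt (by omega) (by omega)
    rw [key]
    have hle : n % 2 ^ m ≤ 2 ^ m - 1 := by
      have := Nat.mod_lt n (Nat.two_pow_pos m)
      omega
    omega

-- Python's a >> 4 is floor division by 16.
theorem shiftR4 (a : Int) : a >>> (4:Nat) = a / 16 := by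
  rw [Int.shiftRight_eq_div_pow]; norm_num

-- Little-endian hex digits of v, k of them (proof-side characterisation).
def hexListLE : Nat → Int → List Char
  | 0, _ => []
  | k + 1, v => hexDigitB (v % 16).toNat :: hexListLE k (v / 16)

-- A's loop, over any control list, produces acc ++ the little-endian digits.
theorem A_loop (l : List Int) (acc : String) (v : Int) :
    ((l.foldl
      (fun (st : String × Int) _ =>
        let w := PySem.Int.band st.2 15
        let r := if w < 10
          then st.1 ++ String.ofList [Char.ofNat (48 + w).toNat]
          else st.1 ++ String.ofList [Char.ofNat (65 + (w - 10)).toNat]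
        (r, st.2 >>> (4:Nat)))
      (acc, v))).1 = acc ++ String.ofList (hexListLE l.length v) := by
  induction l generalizing acc v with
  | nil => simp [hexListLE]
  | cons x l ih =>
    simp only [List.foldl_cons, List.length_cons]
    rw [ih, shiftR4]
    have hb : PySem.Int.band v 15 = v % 16 := by
      have := band_two_pow_sub_one 4 v
      norm_num at this
      exact this
    have h0 : (0:Int) ≤ v % 16 := Int.emod_nonneg v (by norm_num)
    have h16 : v % 16 < 16 := Int.emod_lt_of_pos v (by norm_num)
    simp only [hb, hexListLE]
    split_ifs with h
    · rw [String.append_assoc]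
      congr 1
      have hc : hexDigitB (v % 16).toNat = Char.ofNat (48 + v % 16).toNat := by
        unfold hexDigitB
        rw [if_pos (by omega)]
        congr 1
        omega
      rw [hc, ← String.ofList_append]
      rfl
    · rw [String.append_assoc]
      congr 1
      have hc : hexDigitB (v % 16).toNat = Char.ofNat (65 + (v % 16 - 10)).toNat := by
        unfold hexDigitB
        rw [if_neg (by omega)]
        congr 1
        omega
      rw [hc, ← String.ofList_append]
      rfl

-- Reversing the k-digit big-endian rendering of v mod 16^k gives the little-endian digits.
theorem hexBE_reverse (k : Nat) (v : Int) :
    (hexBE k (v % 16 ^ k).toNat).reverse = hexListLE k v := by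
  induction k generalizing v with
  | zero => simp [hexBE, hexListLE]
  | succ k ih =>
    have hP : (0:Int) < 16 ^ (k + 1) := by positivity
    obtain ⟨r, hr⟩ : ∃ r, v % 16 ^ (k + 1) = r := ⟨_, rfl⟩
    have h0 : (0:Int) ≤ r := hr ▸ Int.emod_nonneg v (by positivity)
    have hlt : r < 16 ^ (k + 1) := hr ▸ Int.emod_lt_of_pos v hP
    -- digit: r.toNat % 16 = (v mod 16).toNat
    have hd : r.toNat % 16 = (v % 16).toNat := by
      have hdvd : (16:Int) ∣ 16 ^ (k + 1) := dvd_pow_self 16 k.succ_ne_zero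
      have h1 : r % 16 = v % 16 := by rw [← hr]; exact Int.emod_emod_of_dvd v hdvd
      omega
    -- tail: r.toNat / 16 = ((v / 16) mod 16^k).toNat
    have ht : r.toNat / 16 = ((v / 16) % 16 ^ k).toNat := by
      have hq := Int.ediv_add_emod v (16 ^ (k + 1))
      have hv : v = 16 ^ (k + 1) * (v / 16 ^ (k + 1)) + r := by omega
      have hdiv : v / 16 = r / 16 + (v / 16 ^ (k + 1)) * 16 ^ k := by
        conv_lhs => rw [hv]
        have h3 : (16:Int) ^ (k + 1) * (v / 16 ^ (k + 1)) + r
            = r + ((v / 16 ^ (k + 1)) * 16 ^ k) * 16 := by ring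
        rw [h3, Int.add_mul_ediv_right _ _ (by norm_num)]
      have hrange : 0 ≤ r / 16 ∧ r / 16 < 16 ^ k := by
        refine ⟨Int.ediv_nonneg h0 (by norm_num), ?_⟩
        have h4 : (16:Int) ^ (k + 1) = 16 ^ k * 16 := by ring
        omega
      have h2 : (v / 16) % 16 ^ k = r / 16 := by
        rw [hdiv]
        have hcomm : r / 16 + (v / 16 ^ (k + 1)) * 16 ^ k
            = r / 16 + 16 ^ k * (v / 16 ^ (k + 1)) := by ring
        rw [hcomm, Int.add_mul_emod_self_left]
        exact Int.emod_eq_of_lt hrange.1 hrange.2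
      rw [h2]
      omega
    simp only [hexBE, List.reverse_append, List.reverse_cons, List.reverse_nil,
      List.nil_append, List.singleton_append, hexListLE]
    rw [hr, hd, ht, ih]

-- ===== VERDICT (by name: the statement is the Claim_ definition above) =====
theorem ToFilePart_spec : Claim_equal_ToFilePart := by
  intro val _
  show ToFilePart val = ToFilePart_alt val
  have hA : ToFilePart val = "" ++ String.ofList (hexListLE (PySem.List.pyRange 0 16 1).length val) :=
    A_loop (PySem.List.pyRange 0 16 1) "" val
  have hlen : (PySem.List.pyRange 0 16 1).length = 16 := by decide
  have hmask : PySem.Int.band val 18446744073709551615 = val % 16 ^ 16 := by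
    have := band_two_pow_sub_one 64 val
    norm_num at this ⊢
    exact this
  rw [hA, hlen, ToFilePart_alt, hmask, hexBE_reverse]
  simp
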